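-- pv_equiv track=rewrite | github.com/lHumaNl/PyHeapProfiler | models/heap_dump.py | filter_comparison_by_status
-- ===== SOURCE A (Python) =====
-- def filter_comparison_by_status(comparison_result, status_filter):
--     """
--     Filter comparison results by object status.
--
--     Args:
--         comparison_result (dict): Original comparison results.
--         status_filter (list): List of statuses to include ('New', 'Deleted', 'Old', 'Modified').
--
--     Returns:
--         dict: Filtered comparison results.
--     """
--     filtered = {}
--     for obj_type, data in comparison_result.items():
--         new = data.get('num_new_objects', 0)
--         deleted = data.get('num_deleted_objects', 0)
--         total_main = data.get('num_objects_main', 0)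
--         total_other = data.get('num_objects_other', 0)
--
--         include = False
--         if 'New' in status_filter and new > 0:
--             include = True
--         elif 'Deleted' in status_filter and deleted > 0:
--             include = True
--         elif 'Old' in status_filter and total_main == total_other and new == 0 and deleted == 0:
--             include = True
--         elif 'Modified' in status_filter and total_other != total_main:
--             include = True
--
--         if include or not status_filter:
--             filtered[obj_type] = data
--     return filtered
-- ===== SOURCE B (Python) =====
-- def _new_keys(comparison_result):
--     return [k for k, d in comparison_result.items()
--             if d.get('num_new_objects', 0) > 0]
--
--
-- def _deleted_keys(comparison_result):
--     return [k for k, d in comparison_result.items()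
--             if d.get('num_deleted_objects', 0) > 0]
--
--
-- def _old_keys(comparison_result):
--     return [k for k, d in comparison_result.items()
--             if d.get('num_objects_main', 0) == d.get('num_objects_other', 0)
--             and d.get('num_new_objects', 0) == 0
--             and d.get('num_deleted_objects', 0) == 0]
--
--
-- def _modified_keys(comparison_result):
--     return [k for k, d in comparison_result.items()
--             if d.get('num_objects_other', 0) != d.get('num_objects_main', 0)]
--
--
-- def filter_comparison_by_status(comparison_result, status_filter):
--     if not status_filter:
--         return dict(comparison_result)
--     keep = set()
--     if 'New' in status_filter:
--         keep.update(_new_keys(comparison_result))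
--     if 'Deleted' in status_filter:
--         keep.update(_deleted_keys(comparison_result))
--     if 'Old' in status_filter:
--         keep.update(_old_keys(comparison_result))
--     if 'Modified' in status_filter:
--         keep.update(_modified_keys(comparison_result))
--     return {k: d for k, d in comparison_result.items() if k in keep}
-- ===== Notes on version B (the rewrite author's own statement) =====
-- stated objective: faster
-- what changed: B replaces A's single pass with an interleaved elif chain of per-entry list-membership tests by a staged algorithm: at most four dedicated scans (one per requested status) collect matching keys into one set, then a final pass keeps the entries whose key is in the set; the filter list is probed only four times in total instead of up to four times per entry.
import Mathlib
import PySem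

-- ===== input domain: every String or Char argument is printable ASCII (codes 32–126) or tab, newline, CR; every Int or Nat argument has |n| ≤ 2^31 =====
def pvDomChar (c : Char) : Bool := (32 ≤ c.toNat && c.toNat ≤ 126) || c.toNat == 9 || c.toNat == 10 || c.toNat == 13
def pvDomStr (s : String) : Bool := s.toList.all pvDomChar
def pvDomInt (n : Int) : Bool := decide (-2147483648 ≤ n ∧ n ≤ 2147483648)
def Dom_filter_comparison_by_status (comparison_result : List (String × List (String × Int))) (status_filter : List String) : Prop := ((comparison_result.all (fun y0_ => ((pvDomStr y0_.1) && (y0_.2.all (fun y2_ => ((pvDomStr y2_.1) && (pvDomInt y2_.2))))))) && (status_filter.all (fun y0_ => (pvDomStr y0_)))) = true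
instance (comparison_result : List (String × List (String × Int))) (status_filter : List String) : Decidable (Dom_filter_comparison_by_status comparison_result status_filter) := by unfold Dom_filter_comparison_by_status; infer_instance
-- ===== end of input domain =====

-- B is a staged re-decomposition of A's one interleaved pass: one dedicated scan per requested
-- status collects matching keys into a set, then a final pass filters by key membership.

-- ===== PORT A =====
-- A's dict.get(key, 0): first-match association-list lookup (exact for the dict convention)
def filter_comparison_by_status (comparison_result : List (String × List (String × Int))) (status_filter : List String) : List (String × List (String × Int)) :=
  (comparison_result.foldl (fun (filtered : PySem.Dict String (List (String × Int))) p =>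
    let data := p.2
    let new := (data.lookup "num_new_objects").getD 0
    let deleted := (data.lookup "num_deleted_objects").getD 0
    let total_main := (data.lookup "num_objects_main").getD 0
    let total_other := (data.lookup "num_objects_other").getD 0
    let include_ : Bool :=
      if status_filter.contains "New" && decide (new > 0) then true
      else if status_filter.contains "Deleted" && decide (deleted > 0) then true
      else if status_filter.contains "Old" && decide (total_main = total_other) && decide (new = 0) && decide (deleted = 0) then true
      else if status_filter.contains "Modified" && decide (total_other ≠ total_main) then true
      else false
    if include_ || status_filter.isEmpty then filtered.insert p.1 data else filtered)
    PySem.Dict.empty).items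

-- ===== PORT B =====
-- the four per-status key scans of Source B (_new_keys / _deleted_keys / _old_keys / _modified_keys)
def pvNewKeys (comparison_result : List (String × List (String × Int))) : List String :=
  (comparison_result.filter (fun p => decide ((p.2.lookup "num_new_objects").getD 0 > 0))).map Prod.fst

def pvDeletedKeys (comparison_result : List (String × List (String × Int))) : List String :=
  (comparison_result.filter (fun p => decide ((p.2.lookup "num_deleted_objects").getD 0 > 0))).map Prod.fst

def pvOldKeys (comparison_result : List (String × List (String × Int))) : List String :=
  (comparison_result.filter (fun p =>
    decide ((p.2.lookup "num_objects_main").getD 0 = (p.2.lookup "num_objects_other").getD 0)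
    && decide ((p.2.lookup "num_new_objects").getD 0 = 0)
    && decide ((p.2.lookup "num_deleted_objects").getD 0 = 0))).map Prod.fst

def pvModifiedKeys (comparison_result : List (String × List (String × Int))) : List String :=
  (comparison_result.filter (fun p =>
    decide ((p.2.lookup "num_objects_other").getD 0 ≠ (p.2.lookup "num_objects_main").getD 0))).map Prod.fst

def filter_comparison_by_status_alt (comparison_result : List (String × List (String × Int))) (status_filter : List String) : List (String × List (String × Int)) :=
  if status_filter.isEmpty then comparison_result
  else
    let keep : PySem.Set String := PySem.Set.empty
    let keep := if status_filter.contains "New" then PySem.Set.update keep (pvNewKeys comparison_result) else keep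
    let keep := if status_filter.contains "Deleted" then PySem.Set.update keep (pvDeletedKeys comparison_result) else keep
    let keep := if status_filter.contains "Old" then PySem.Set.update keep (pvOldKeys comparison_result) else keep
    let keep := if status_filter.contains "Modified" then PySem.Set.update keep (pvModifiedKeys comparison_result) else keep
    comparison_result.filter (fun p => keep.contains p.1)

-- ===== PRECONDITION & SPEC =====
-- Pre_ excludes comparison_result lists whose (dict) keys repeat: a Python dict cannot hold
-- duplicate keys, and on such lists A's overwrite-insertion order is accidental.
def Pre_filter_comparison_by_status (comparison_result : List (String × List (String × Int))) (status_filter : List String) : Prop :=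
  (comparison_result.map Prod.fst).Nodup
instance (comparison_result : List (String × List (String × Int))) (status_filter : List String) : Decidable (Pre_filter_comparison_by_status comparison_result status_filter) := by unfold Pre_filter_comparison_by_status; infer_instance

def pvWitness_filter_comparison_by_status : (List (String × List (String × Int))) × List String :=
  ([("a", [("num_new_objects", 1)]), ("b", [])], ["New", "Old"])

def Spec_filter_comparison_by_status (comparison_result : List (String × List (String × Int))) (status_filter : List String) (out : List (String × List (String × Int))) : Prop := out = filter_comparison_by_status_alt comparison_result status_filter
instance (comparison_result : List (String × List (String × Int))) (status_filter : List String) (out : List (String × List (String × Int))) : Decidable (Spec_filter_comparison_by_status comparison_result status_filter out) := by unfold Spec_filter_comparison_by_status; infer_instance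

-- ===== CLAIM (what is proved, stated in full; the proofs are below) =====
def Claim_equal_filter_comparison_by_status : Prop := ∀ (comparison_result : List (String × List (String × Int))) (status_filter : List String), Dom_filter_comparison_by_status comparison_result status_filter → Pre_filter_comparison_by_status comparison_result status_filter → Spec_filter_comparison_by_status comparison_result status_filter (filter_comparison_by_status comparison_result status_filter)

-- ===== LEMMAS AND PROOFS =====

-- A's per-entry keep decision, named for the proofs
def pvKeep (status_filter : List String) (data : List (String × Int)) : Bool :=
  let new := (data.lookup "num_new_objects").getD 0
  let deleted := (data.lookup "num_deleted_objects").getD 0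
  let total_main := (data.lookup "num_objects_main").getD 0
  let total_other := (data.lookup "num_objects_other").getD 0
  let include_ : Bool :=
    if status_filter.contains "New" && decide (new > 0) then true
    else if status_filter.contains "Deleted" && decide (deleted > 0) then true
    else if status_filter.contains "Old" && decide (total_main = total_other) && decide (new = 0) && decide (deleted = 0) then true
    else if status_filter.contains "Modified" && decide (total_other ≠ total_main) then true
    else false
  include_ || status_filter.isEmpty

lemma pv_chain_or (a b c d : Bool) :
    (if a = true then true else if b = true then true else if c = true then true else if d = true then true else false)
      = (a || b || c || d) := by
  cases a <;> cases b <;> cases c <;> cases d <;> rfl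

-- A's fold, with its keep decision abstracted: items of the accumulator dict
lemma foldl_insert_items (status_filter : List String)
    (cr : List (String × List (String × Int))) (d : PySem.Dict String (List (String × Int)))
    (hn : ∀ p ∈ cr, d.contains p.1 = false) (hcr : (cr.map Prod.fst).Nodup) :
    (cr.foldl (fun (filtered : PySem.Dict String (List (String × Int))) p =>
        if pvKeep status_filter p.2 then filtered.insert p.1 p.2 else filtered) d).items
      = d.items ++ cr.filter (fun p => pvKeep status_filter p.2) := by
  induction cr generalizing d with
  | nil => simp
  | cons p rest ih =>
    simp only [List.foldl_cons, List.filter_cons]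
    by_cases hk : pvKeep status_filter p.2
    · rw [if_pos hk, if_pos hk]
      have hd : d.contains p.1 = false := hn p (List.mem_cons_self ..)
      rw [ih (d.insert p.1 p.2) ?_ (by simpa using hcr.of_cons)]
      · rw [PySem.Dict.items_insert_of_not_contains d p.2 hd]
        simp
      · intro q hq
        have hne : q.1 ≠ p.1 := by
          simp only [List.map_cons, List.nodup_cons] at hcr
          intro he
          exact hcr.1 (he ▸ List.mem_map_of_mem hq)
        rw [Bool.eq_false_iff]
        intro hc
        rcases (PySem.Dict.contains_iff_mem_keys _ _).1 hc with hmem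
        rw [PySem.Dict.keys_insert_of_not_contains d p.2 hd] at hmem
        rcases List.mem_append.1 hmem with h | h
        · have := hn q (List.mem_cons_of_mem _ hq)
          rw [Bool.eq_false_iff] at this
          exact this ((PySem.Dict.contains_iff_mem_keys _ _).2 h)
        · exact hne (by simpa using h)
    · rw [if_neg hk, if_neg hk]
      exact ih d (fun q hq => hn q (List.mem_cons_of_mem _ hq)) (by simpa using hcr.of_cons)

lemma portA_eq_filter (cr : List (String × List (String × Int))) (sf : List String)
    (hcr : (cr.map Prod.fst).Nodup) :
    filter_comparison_by_status cr sf = cr.filter (fun p => pvKeep sf p.2) := by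
  unfold filter_comparison_by_status
  have : (fun (filtered : PySem.Dict String (List (String × Int))) (p : String × List (String × Int)) =>
      let data := p.2
      let new := (data.lookup "num_new_objects").getD 0
      let deleted := (data.lookup "num_deleted_objects").getD 0
      let total_main := (data.lookup "num_objects_main").getD 0
      let total_other := (data.lookup "num_objects_other").getD 0
      let include_ : Bool :=
        if sf.contains "New" && decide (new > 0) then true
        else if sf.contains "Deleted" && decide (deleted > 0) then true
        else if sf.contains "Old" && decide (total_main = total_other) && decide (new = 0) && decide (deleted = 0) then true
        else if sf.contains "Modified" && decide (total_other ≠ total_main) then true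
        else false
      if include_ || sf.isEmpty then filtered.insert p.1 data else filtered)
      = (fun filtered p => if pvKeep sf p.2 then filtered.insert p.1 p.2 else filtered) := by
    funext filtered p
    rfl
  rw [this, foldl_insert_items sf cr PySem.Dict.empty (fun p _ => rfl) hcr]
  rfl

-- On a nodup-keyed list, a key of an entry is in a filtered key scan iff that entry matches
lemma mem_keys_filter (cr : List (String × List (String × Int)))
    (hcr : (cr.map Prod.fst).Nodup) (p : String × List (String × Int)) (hp : p ∈ cr)
    (f : String × List (String × Int) → Bool) :
    p.1 ∈ (cr.filter f).map Prod.fst ↔ f p = true := by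
  constructor
  · intro h
    obtain ⟨q, hq, he⟩ := List.mem_map.1 h
    have hq' := List.mem_filter.1 hq
    have : q = p := List.inj_on_of_nodup_map hcr hq'.1 hp he
    exact this ▸ hq'.2
  · intro h
    exact List.mem_map_of_mem (List.mem_filter.2 ⟨hp, h⟩)

lemma portB_keep (cr : List (String × List (String × Int))) (sf : List String)
    (hcr : (cr.map Prod.fst).Nodup) (p : String × List (String × Int)) (hp : p ∈ cr) :
    (let keep : PySem.Set String := PySem.Set.empty
     let keep := if sf.contains "New" then PySem.Set.update keep (pvNewKeys cr) else keep
     let keep := if sf.contains "Deleted" then PySem.Set.update keep (pvDeletedKeys cr) else keep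
     let keep := if sf.contains "Old" then PySem.Set.update keep (pvOldKeys cr) else keep
     let keep := if sf.contains "Modified" then PySem.Set.update keep (pvModifiedKeys cr) else keep
     keep.contains p.1) = true ↔
      (sf.contains "New" && decide ((p.2.lookup "num_new_objects").getD 0 > 0)
       || sf.contains "Deleted" && decide ((p.2.lookup "num_deleted_objects").getD 0 > 0)
       || sf.contains "Old" && decide ((p.2.lookup "num_objects_main").getD 0 = (p.2.lookup "num_objects_other").getD 0)
            && decide ((p.2.lookup "num_new_objects").getD 0 = 0) && decide ((p.2.lookup "num_deleted_objects").getD 0 = 0)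
       || sf.contains "Modified" && decide ((p.2.lookup "num_objects_other").getD 0 ≠ (p.2.lookup "num_objects_main").getD 0)) = true := by
  simp only [PySem.Set.contains, List.contains_iff_mem]
  have hnew := mem_keys_filter cr hcr p hp (fun q => decide ((q.2.lookup "num_new_objects").getD 0 > 0))
  have hdel := mem_keys_filter cr hcr p hp (fun q => decide ((q.2.lookup "num_deleted_objects").getD 0 > 0))
  have hold := mem_keys_filter cr hcr p hp (fun q =>
    decide ((q.2.lookup "num_objects_main").getD 0 = (q.2.lookup "num_objects_other").getD 0)
    && decide ((q.2.lookup "num_new_objects").getD 0 = 0)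
    && decide ((q.2.lookup "num_deleted_objects").getD 0 = 0))
  have hmod := mem_keys_filter cr hcr p hp (fun q =>
    decide ((q.2.lookup "num_objects_other").getD 0 ≠ (q.2.lookup "num_objects_main").getD 0))
  split_ifs with h1 h2 h3 h4 <;>
    simp_all [PySem.Set.mem_update, PySem.Set.empty, pvNewKeys, pvDeletedKeys, pvOldKeys, pvModifiedKeys]

-- ===== VERDICT (by name: the statement is the Claim_ definition above) =====
theorem filter_comparison_by_status_spec : Claim_equal_filter_comparison_by_status := by
  intro cr sf _ hpre
  unfold Spec_filter_comparison_by_status filter_comparison_by_status_alt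
  rw [portA_eq_filter cr sf hpre]
  by_cases hsf : sf.isEmpty
  · rw [if_pos hsf]
    apply List.filter_eq_self.2
    intro p _
    rw [pvKeep, hsf]
    simp
  · rw [if_neg hsf]
    apply List.filter_congr
    intro p hp
    have hb := portB_keep cr sf hpre p hp
    rw [pvKeep]
    simp only [Bool.eq_false_iff.mpr hsf, Bool.or_false]
    rw [pv_chain_or]
    rw [Bool.eq_iff_iff]
    exact hb.symm
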